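-- pv_equiv track=rewrite | github.com/eliottcassidy2000/math | 04-computation/nonham_vanish_n13_corrected.py | count_paths_starting_at
-- ===== SOURCE A (Python) =====
-- def count_paths_starting_at(T, verts, source):
--     """Count Ham paths on verts starting at source, using DP."""
--     verts = list(verts)
--     n = len(verts)
--     if n == 1:
--         return 1 if verts[0] == source else 0
--     v_to_idx = {v: i for i, v in enumerate(verts)}
--     if source not in v_to_idx:
--         return 0
--     full = (1 << n) - 1
--     dp = {}
--     si = v_to_idx[source]
--     dp[(1 << si, si)] = 1
--     for mask in range(1, 1 << n):
--         for li in range(n):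
--             if not ((mask >> li) & 1): continue
--             cnt = dp.get((mask, li), 0)
--             if cnt == 0: continue
--             for ni in range(n):
--                 if (mask >> ni) & 1: continue
--                 if T.get((verts[li], verts[ni]), 0) == 0: continue
--                 nkey = (mask | (1 << ni), ni)
--                 dp[nkey] = dp.get(nkey, 0) + cnt
--     total = 0
--     for li in range(n):
--         total += dp.get((full, li), 0)
--     return total
-- ===== SOURCE B (Python) =====
-- def count_paths_starting_at(T, verts, source):
--     """Count Ham paths on verts starting at source, by recursive backtracking."""
--     verts = list(verts)
--     n = len(verts)
--     v_to_idx = {v: i for i, v in enumerate(verts)}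
--     if source not in v_to_idx:
--         return 0
--     si = v_to_idx[source]
--
--     def dfs(cur, mask, remaining):
--         if remaining == 0:
--             return 1
--         total = 0
--         for ni in range(n):
--             if (mask >> ni) & 1:
--                 continue
--             if T.get((verts[cur], verts[ni]), 0) == 0:
--                 continue
--             total += dfs(ni, mask | (1 << ni), remaining - 1)
--         return total
--
--     return dfs(si, 1 << si, n - 1)
-- ===== Notes on version B (the rewrite author's own statement) =====
-- stated objective: simpler
-- what changed: Replaced the bottom-up bitmask DP table (dict keyed by (mask,last), all 2^n masks enumerated) by a direct recursive DFS/backtracking count from the source index; guards (vertex->index map, edge test) kept identical.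
import Mathlib
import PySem

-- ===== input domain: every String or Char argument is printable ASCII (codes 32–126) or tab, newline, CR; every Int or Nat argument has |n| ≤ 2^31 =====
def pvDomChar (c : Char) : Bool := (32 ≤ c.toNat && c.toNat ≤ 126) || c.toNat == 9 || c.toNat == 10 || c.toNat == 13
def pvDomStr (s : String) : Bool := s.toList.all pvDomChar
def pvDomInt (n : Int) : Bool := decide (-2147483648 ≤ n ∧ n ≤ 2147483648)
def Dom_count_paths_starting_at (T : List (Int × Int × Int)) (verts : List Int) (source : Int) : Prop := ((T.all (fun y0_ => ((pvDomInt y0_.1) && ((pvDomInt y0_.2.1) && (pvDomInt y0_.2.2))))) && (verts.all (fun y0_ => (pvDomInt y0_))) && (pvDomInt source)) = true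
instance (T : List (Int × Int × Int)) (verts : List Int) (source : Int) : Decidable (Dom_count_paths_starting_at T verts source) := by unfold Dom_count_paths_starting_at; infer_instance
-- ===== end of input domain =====

-- B changes the algorithm: A's bottom-up bitmask-DP table is replaced by a direct
-- recursive DFS/backtracking count from the source index (objective: simpler).

-- ===== PORT A =====
-- shared helpers (identical lines of both Pythons):
-- T.get((u, v), 0) on the dict T, ported as first-match lookup in the association list
def tget (T : List (Int × Int × Int)) (u v : Int) : Int :=
  match T.find? (fun t => t.1 == u && t.2.1 == v) with
  | some t => t.2.2
  | none => 0

-- verts[i] (i is always in range in both programs)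
def vget (verts : List Int) (i : Nat) : Int := verts.getD i 0

-- v_to_idx = {v: i for i, v in enumerate(verts)} (index kept as Nat; same values)
def vIdx (verts : List Int) : PySem.Dict Int Nat :=
  (verts.zipIdx).foldl (fun d p => d.insert p.1 p.2) PySem.Dict.empty

-- A's innermost loop: for ni in range(n): … dp[nkey] = dp.get(nkey, 0) + cnt
def aInnerF (T : List (Int × Int × Int)) (verts : List Int) (M li : Nat) (cnt : Int)
    (dp : PySem.Dict (Nat × Nat) Int) (ni : Nat) : PySem.Dict (Nat × Nat) Int :=
  if M.testBit ni then dp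
  else if tget T (vget verts li) (vget verts ni) = 0 then dp
  else dp.insert (M ||| 2 ^ ni, ni) (dp.getD (M ||| 2 ^ ni, ni) 0 + cnt)

-- A's middle loop body: for li in range(n): …
def aLiF (T : List (Int × Int × Int)) (verts : List Int) (n M : Nat)
    (dp : PySem.Dict (Nat × Nat) Int) (li : Nat) : PySem.Dict (Nat × Nat) Int :=
  if ¬ M.testBit li then dp
  else
    let cnt := dp.getD (M, li) 0
    if cnt = 0 then dp
    else (List.range n).foldl (aInnerF T verts M li cnt) dp

-- A's DP table after the loops: for mask in range(1, 1 << n): …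
def aDP (T : List (Int × Int × Int)) (verts : List Int) (n si : Nat) : PySem.Dict (Nat × Nat) Int :=
  (List.range' 1 (2 ^ n - 1)).foldl (fun dp M => (List.range n).foldl (aLiF T verts n M) dp)
    (PySem.Dict.empty.insert (2 ^ si, si) 1)

def count_paths_starting_at (T : List (Int × Int × Int)) (verts : List Int) (source : Int) : Int :=
  let n := verts.length
  if n = 1 then (if vget verts 0 = source then 1 else 0)
  else
    match (vIdx verts).get? source with
    | none => 0
    | some si =>
      let dp := aDP T verts n si
      let full := 2 ^ n - 1
      (List.range n).foldl (fun total li => total + dp.getD (full, li) 0) 0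

-- ===== PORT B =====
-- dfs(cur, mask, remaining) of Source B (remaining is the structural recursion argument)
def dfsB (T : List (Int × Int × Int)) (verts : List Int) (n : Nat) :
    Nat → Nat → Nat → Int
  | 0, _, _ => 1
  | r + 1, cur, mask =>
    (List.range n).foldl (fun total ni =>
      if mask.testBit ni then total
      else if tget T (vget verts cur) (vget verts ni) = 0 then total
      else total + dfsB T verts n r ni (mask ||| 2 ^ ni)) 0

def count_paths_starting_at_alt (T : List (Int × Int × Int)) (verts : List Int) (source : Int) : Int :=
  let n := verts.length
  match (vIdx verts).get? source with
  | none => 0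
  | some si => dfsB T verts n (n - 1) si (2 ^ si)

-- ===== PRECONDITION & SPEC =====
def Spec_count_paths_starting_at (T : List (Int × Int × Int)) (verts : List Int) (source : Int) (out : Int) : Prop := out = count_paths_starting_at_alt T verts source
instance (T : List (Int × Int × Int)) (verts : List Int) (source : Int) (out : Int) : Decidable (Spec_count_paths_starting_at T verts source out) := by unfold Spec_count_paths_starting_at; infer_instance

-- ===== CLAIM (what is proved, stated in full; the proofs are below) =====
def Claim_equal_count_paths_starting_at : Prop := ∀ (T : List (Int × Int × Int)) (verts : List Int) (source : Int), Dom_count_paths_starting_at T verts source → Spec_count_paths_starting_at T verts source (count_paths_starting_at T verts source)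

-- ===== LEMMAS AND PROOFS =====

-- ---- generic bit facts ----
theorem pv_testBit_lt {m n j : Nat} (hm : m < 2 ^ n) (hj : m.testBit j = true) : j < n := by
  by_contra h
  have : m < 2 ^ j := lt_of_lt_of_le hm (Nat.pow_le_pow_right (by norm_num) (by omega))
  simp [Nat.testBit_lt_two_pow this] at hj

theorem pv_aux_even (q k : Nat) (hq : q % 2 = 0) :
    (q + 1).testBit k = (q.testBit k || decide (k = 0)) := by
  cases k with
  | zero =>
    simp [Nat.testBit_zero]
    omega
  | succ k =>
    rw [Nat.testBit_add_one, Nat.testBit_add_one]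
    have : (q + 1) / 2 = q / 2 := by omega
    simp [this]

theorem pv_testBit_add_pow (m i : Nat) (h : m.testBit i = false) (j : Nat) :
    (m + 2 ^ i).testBit j = (m.testBit j || decide (j = i)) := by
  have hpos : 0 < 2 ^ i := Nat.two_pow_pos i
  have hr : m % 2 ^ i < 2 ^ i := Nat.mod_lt _ hpos
  have hq : 2 ^ i * (m / 2 ^ i) + m % 2 ^ i = m := by
    exact Nat.div_add_mod m (2 ^ i)
  have hm : ∀ j', m.testBit j' = if j' < i then (m % 2 ^ i).testBit j' else (m / 2 ^ i).testBit (j' - i) := by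
    intro j'
    conv_lhs => rw [← hq]
    rw [Nat.testBit_two_pow_mul_add _ hr j']
  have heq : m + 2 ^ i = 2 ^ i * (m / 2 ^ i + 1) + m % 2 ^ i := by
    rw [Nat.mul_succ]; omega
  rw [heq, Nat.testBit_two_pow_mul_add _ hr j]
  by_cases hj : j < i
  · rw [if_pos hj, hm j, if_pos hj]
    have : ¬ (j = i) := by omega
    simp [this]
  · have hqe : (m / 2 ^ i) % 2 = 0 := by
      have h2 := hm i
      rw [h, if_neg (by omega), Nat.sub_self, Nat.testBit_zero] at h2
      have h3 : ¬ (m / 2 ^ i % 2 = 1) := by simpa using h2.symm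
      omega
    rw [if_neg hj, pv_aux_even _ _ hqe, hm j, if_neg hj]
    congr 1
    simp only [decide_eq_decide]
    omega

theorem pv_lor_eq_add {m i : Nat} (h : m.testBit i = false) : m ||| 2 ^ i = m + 2 ^ i := by
  apply Nat.eq_of_testBit_eq
  intro j
  rw [pv_testBit_add_pow m i h j, Nat.testBit_or, Nat.testBit_two_pow]
  cases hm : m.testBit j <;> simp [eq_comm]

theorem pv_testBit_sub_pow {m' i : Nat} (h : m'.testBit i = true) :
    (m' - 2 ^ i).testBit i = false ∧ (m' - 2 ^ i) + 2 ^ i = m' := by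
  have hge := Nat.ge_two_pow_of_testBit h
  have hadd : (m' - 2 ^ i) + 2 ^ i = m' := by omega
  refine ⟨?_, hadd⟩
  by_contra hb
  have hb' : (m' - 2 ^ i).testBit i = true := by revert hb; cases (m' - 2 ^ i).testBit i <;> simp
  have := Nat.testBit_two_pow_add_eq (m' - 2 ^ i) i
  rw [Nat.add_comm] at hadd
  rw [hadd, h, hb'] at this
  simp at this

-- popcount below n
def pbc (n m : Nat) : Nat := ((Finset.range n).filter (fun i => m.testBit i)).card

theorem pbc_add_pow {n m i : Nat} (hi : i < n) (h : m.testBit i = false) :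
    pbc n (m + 2 ^ i) = pbc n m + 1 := by
  unfold pbc
  have hset : (Finset.range n).filter (fun j => (m + 2 ^ i).testBit j)
      = insert i ((Finset.range n).filter (fun j => m.testBit j)) := by
    ext j
    simp only [Finset.mem_filter, Finset.mem_insert, Finset.mem_range,
      pv_testBit_add_pow m i h j]
    by_cases hj : j = i
    · subst hj; simp [hi]
    · simp [hj]
    
  rw [hset, Finset.card_insert_of_notMem (by simp [h])]

theorem pbc_pow {n i : Nat} (hi : i < n) : pbc n (2 ^ i) = 1 := by
  unfold pbc
  have : (Finset.range n).filter (fun j => (2 ^ i).testBit j) = {i} := by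
    ext j
    simp only [Finset.mem_filter, Finset.mem_singleton, Finset.mem_range, Nat.testBit_two_pow]
    constructor
    · rintro ⟨_, h⟩; exact (of_decide_eq_true h).symm
    · rintro rfl; simp [hi]
  simp [this]

theorem pbc_full {n m : Nat} (hm : m < 2 ^ n) (h : pbc n m = n) : m = 2 ^ n - 1 := by
  have hsub : (Finset.range n).filter (fun i => m.testBit i) ⊆ Finset.range n :=
    Finset.filter_subset _ _
  have heq : (Finset.range n).filter (fun i => m.testBit i) = Finset.range n := by
    apply Finset.eq_of_subset_of_card_le hsub
    simp [pbc] at h; simp [h]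
  apply Nat.eq_of_testBit_eq
  intro j
  rw [Nat.testBit_two_pow_sub_one]
  by_cases hj : j < n
  · have : j ∈ (Finset.range n).filter (fun i => m.testBit i) := by rw [heq]; simp [hj]
    simp only [Finset.mem_filter] at this
    simp [this.2, hj]
  · have : m < 2 ^ j := lt_of_lt_of_le hm (Nat.pow_le_pow_right (by norm_num) (by omega))
    simp [Nat.testBit_lt_two_pow this, hj]

theorem pbc_one {n m l : Nat} (hm : m < 2 ^ n) (h : pbc n m = 1) (hl : m.testBit l = true) :
    m = 2 ^ l := by
  have hln : l < n := pv_testBit_lt hm hl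
  have heq : (Finset.range n).filter (fun i => m.testBit i) = {l} := by
    apply Finset.eq_singleton_iff_unique_mem.mpr
    constructor
    · simp [hln, hl]
    · intro j hj
      by_contra hne
      have h2 : ({j, l} : Finset Nat) ⊆ (Finset.range n).filter (fun i => m.testBit i) := by
        intro x hx
        simp only [Finset.mem_insert, Finset.mem_singleton] at hx
        rcases hx with rfl | rfl
        · exact hj
        · simp [hln, hl]
      have := Finset.card_le_card h2
      rw [Finset.card_pair hne] at this
      simp [pbc] at h; omega
  apply Nat.eq_of_testBit_eq
  intro j
  rw [Nat.testBit_two_pow]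
  by_cases hj : j = l
  · subst hj; simp [hl]
  · by_cases hjn : j < n
    · have : j ∉ ({l} : Finset Nat) := by simp [hj]
      rw [← heq] at this
      simp only [Finset.mem_filter, Finset.mem_range, not_and] at this
      have h3 := this hjn
      have h4 : m.testBit j = false := by revert h3; cases m.testBit j <;> simp
      simp [h4]; omega
    · have : m < 2 ^ j := lt_of_lt_of_le hm (Nat.pow_le_pow_right (by norm_num) (by omega))
      simp [Nat.testBit_lt_two_pow this]; omega

theorem pv_lor_lt {m i n : Nat} (hm : m < 2 ^ n) (hi : i < n) : m ||| 2 ^ i < 2 ^ n := by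
  apply Nat.lt_pow_two_of_testBit
  intro j hj
  rw [Nat.testBit_or, Nat.testBit_two_pow]
  have h1 : m.testBit j = false := Nat.testBit_lt_two_pow (lt_of_lt_of_le hm (Nat.pow_le_pow_right (by norm_num) hj))
  have h2 : ¬ (i = j) := by omega
  simp [h1, h2]

-- ---- the forward count (number of A-paths from (2^si, si) to (m, l)) ----
def pvFwd (T : List (Int × Int × Int)) (verts : List Int) (n si m l : Nat) : Int :=
  if h : m.testBit l then
    if m = 2 ^ si ∧ l = si then 1
    else ((List.range n).map (fun j =>
      if (m - 2 ^ l).testBit j ∧ tget T (vget verts j) (vget verts l) ≠ 0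
      then pvFwd T verts n si (m - 2 ^ l) j else 0)).sum
  else 0
termination_by m
decreasing_by
  have := Nat.ge_two_pow_of_testBit h
  have : 0 < 2 ^ l := Nat.two_pow_pos l
  omega

def pvPend (T : List (Int × Int × Int)) (verts : List Int) (n si M m l : Nat) : Int :=
  if m.testBit l ∧ m - 2 ^ l < M then pvFwd T verts n si m l else 0

-- ---- DP loop invariant ----
theorem pv_inner (T : List (Int × Int × Int)) (verts : List Int) (M li : Nat) (cnt : Int)
    (L : List Nat) (hnd : L.Nodup) (dp : PySem.Dict (Nat × Nat) Int) (m l : Nat) :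
    (L.foldl (aInnerF T verts M li cnt) dp).getD (m, l) 0
    = dp.getD (m, l) 0 +
      (if l ∈ L ∧ M.testBit l = false ∧ tget T (vget verts li) (vget verts l) ≠ 0 ∧ m = M ||| 2 ^ l
       then cnt else 0) := by
  induction L generalizing dp with
  | nil => simp
  | cons ni rest ih =>
    rw [List.foldl_cons, ih (List.nodup_cons.mp hnd).2]
    have hnotin : ni ∉ rest := (List.nodup_cons.mp hnd).1
    unfold aInnerF
    by_cases h1 : M.testBit ni
    · rw [if_pos h1]
      by_cases hl : l = ni
      · subst hl
        simp [h1, hnotin]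
      · congr 1
        exact if_congr (by simp [hl]) rfl rfl
    · rw [if_neg h1]
      by_cases h2 : tget T (vget verts li) (vget verts ni) = 0
      · rw [if_pos h2]
        by_cases hl : l = ni
        · subst hl
          simp [h2, hnotin]
        · congr 1
          exact if_congr (by simp [hl]) rfl rfl
      · rw [if_neg h2]
        rw [PySem.Dict.getD_insert]
        by_cases hk : (m, l) = (M ||| 2 ^ ni, ni)
        · rw [if_pos hk]
          have hl : l = ni := (Prod.mk.injEq _ _ _ _ ▸ hk).2
          have hmm : m = M ||| 2 ^ ni := (Prod.mk.injEq _ _ _ _ ▸ hk).1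
          subst hl
          have hrest : l ∉ rest := hnotin
          rw [if_neg (by simp [hrest]), if_pos (by simp [h1, h2, hmm])]
          rw [← hmm]
          omega
        · rw [if_neg hk]
          by_cases hl : l = ni
          · subst hl
            have hmm : ¬ (m = M ||| 2 ^ l) := fun h => hk (by rw [h])
            rw [if_neg (by simp [hnotin]), if_neg (by simp [hmm])]
          · congr 1
            exact if_congr (by simp [hl]) rfl rfl

theorem pv_liF_getD (T : List (Int × Int × Int)) (verts : List Int) (n M : Nat)
    (dp : PySem.Dict (Nat × Nat) Int) (li m l : Nat) :
    (aLiF T verts n M dp li).getD (m, l) 0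
    = dp.getD (m, l) 0 +
      (if M.testBit li = true ∧ l < n ∧ M.testBit l = false ∧
          tget T (vget verts li) (vget verts l) ≠ 0 ∧ m = M ||| 2 ^ l
       then dp.getD (M, li) 0 else 0) := by
  unfold aLiF
  by_cases h1 : M.testBit li
  · rw [if_neg (by simp [h1])]
    by_cases hc : dp.getD (M, li) 0 = 0
    · rw [if_pos hc, hc]
      simp
    · rw [if_neg hc, pv_inner T verts M li _ (List.range n) (List.nodup_range) dp m l]
      congr 1
      apply if_congr _ rfl rfl
      constructor
      · rintro ⟨ha, hb, hc', hd⟩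
        exact ⟨h1, List.mem_range.mp ha, hb, hc', hd⟩
      · rintro ⟨_, ha, hb, hc', hd⟩
        exact ⟨List.mem_range.mpr ha, hb, hc', hd⟩
  · rw [if_pos h1]
    have : ¬ (M.testBit li = true ∧ l < n ∧ M.testBit l = false ∧
        tget T (vget verts li) (vget verts l) ≠ 0 ∧ m = M ||| 2 ^ l) := by
      rintro ⟨h, -⟩; exact h1 h
    rw [if_neg this, add_zero]

theorem pv_liF_getD_M (T : List (Int × Int × Int)) (verts : List Int) (n M : Nat)
    (dp : PySem.Dict (Nat × Nat) Int) (li li' : Nat) :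
    (aLiF T verts n M dp li).getD (M, li') 0 = dp.getD (M, li') 0 := by
  rw [pv_liF_getD T verts n M dp li M li']
  have : ¬ (M.testBit li = true ∧ li' < n ∧ M.testBit li' = false ∧
      tget T (vget verts li) (vget verts li') ≠ 0 ∧ M = M ||| 2 ^ li') := by
    rintro ⟨-, -, hb, -, hm⟩
    have : M.testBit li' = true := by
      conv_lhs => rw [hm]
      simp [Nat.testBit_or, Nat.testBit_two_pow_self]
    rw [this] at hb; cases hb
  rw [if_neg this, add_zero]

theorem pv_outer (T : List (Int × Int × Int)) (verts : List Int) (n M : Nat)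
    (L : List Nat) (dp : PySem.Dict (Nat × Nat) Int) (m l : Nat) :
    (L.foldl (aLiF T verts n M) dp).getD (m, l) 0
    = dp.getD (m, l) 0 +
      (L.map (fun li =>
        if M.testBit li = true ∧ l < n ∧ M.testBit l = false ∧
            tget T (vget verts li) (vget verts l) ≠ 0 ∧ m = M ||| 2 ^ l
        then dp.getD (M, li) 0 else 0)).sum := by
  induction L generalizing dp with
  | nil => simp
  | cons li rest ih =>
    rw [List.foldl_cons, ih (aLiF T verts n M dp li), pv_liF_getD T verts n M dp li m l]
    simp only [pv_liF_getD_M T verts n M dp li]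
    rw [List.map_cons, List.sum_cons]
    ring

def pvINV (T : List (Int × Int × Int)) (verts : List Int) (n si M : Nat)
    (dp : PySem.Dict (Nat × Nat) Int) : Prop :=
  ∀ m l, m < 2 ^ n → l < n → dp.getD (m, l) 0 = pvPend T verts n si M m l

theorem pv_fwd_eq_sum (T : List (Int × Int × Int)) (verts : List Int) (n si m l : Nat)
    (hbit : m.testBit l = true) (hnb : ¬ (m = 2 ^ si ∧ l = si)) :
    pvFwd T verts n si m l
    = ((List.range n).map (fun j =>
        if (m - 2 ^ l).testBit j ∧ tget T (vget verts j) (vget verts l) ≠ 0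
        then pvFwd T verts n si (m - 2 ^ l) j else 0)).sum := by
  rw [pvFwd]; simp [hbit, hnb]

theorem pv_step (T : List (Int × Int × Int)) (verts : List Int) (n si M : Nat)
    (hM1 : 1 ≤ M) (hM2 : M < 2 ^ n) (dp : PySem.Dict (Nat × Nat) Int)
    (h : pvINV T verts n si M dp) :
    pvINV T verts n si (M + 1) ((List.range n).foldl (aLiF T verts n M) dp) := by
  intro m l hm hl
  rw [pv_outer T verts n M (List.range n) dp m l, h m l hm hl]
  have hterm : ∀ li ∈ List.range n,
      (if M.testBit li = true ∧ l < n ∧ M.testBit l = false ∧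
          tget T (vget verts li) (vget verts l) ≠ 0 ∧ m = M ||| 2 ^ l
       then dp.getD (M, li) 0 else 0)
      = (if M.testBit li = true ∧ l < n ∧ M.testBit l = false ∧
          tget T (vget verts li) (vget verts l) ≠ 0 ∧ m = M ||| 2 ^ l
       then pvFwd T verts n si M li else 0) := by
    intro li hli
    by_cases hcnd : M.testBit li = true ∧ l < n ∧ M.testBit l = false ∧
        tget T (vget verts li) (vget verts l) ≠ 0 ∧ m = M ||| 2 ^ l
    · rw [if_pos hcnd, if_pos hcnd, h M li hM2 (List.mem_range.mp hli)]
      unfold pvPend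
      have hge := Nat.ge_two_pow_of_testBit hcnd.1
      have hpos : 0 < 2 ^ li := Nat.two_pow_pos li
      have hlt : M - 2 ^ li < M := by omega
      rw [if_pos ⟨hcnd.1, hlt⟩]
    · rw [if_neg hcnd, if_neg hcnd]
  rw [List.map_congr_left hterm]
  by_cases hc : M.testBit l = false ∧ m = M ||| 2 ^ l
  · have hml : m = M + 2 ^ l := by rw [hc.2, pv_lor_eq_add hc.1]
    have hbit : m.testBit l = true := by
      rw [hml, pv_testBit_add_pow M l hc.1 l]
      simp
    have hpos : 0 < 2 ^ l := Nat.two_pow_pos l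
    have hsub : m - 2 ^ l = M := by omega
    have hnb : ¬ (m = 2 ^ si ∧ l = si) := by
      rintro ⟨h1, h2⟩
      subst h2
      rw [h1] at hsub
      omega
    unfold pvPend
    have hlt : m - 2 ^ l < M + 1 := by omega
    rw [if_neg (by rintro ⟨-, h2⟩; omega), if_pos ⟨hbit, hlt⟩]
    rw [pv_fwd_eq_sum T verts n si m l hbit hnb, hsub, zero_add]
    apply congrArg
    apply List.map_congr_left
    intro j hj
    apply if_congr _ rfl rfl
    constructor
    · rintro ⟨h1, -, -, h4, -⟩; exact ⟨h1, h4⟩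
    · rintro ⟨h1, h4⟩; exact ⟨h1, hl, hc.1, h4, hc.2⟩
  · have hz : (List.map (fun li =>
        if M.testBit li = true ∧ l < n ∧ M.testBit l = false ∧
            tget T (vget verts li) (vget verts l) ≠ 0 ∧ m = M ||| 2 ^ l
        then pvFwd T verts n si M li else 0) (List.range n)).sum = 0 := by
      apply List.sum_eq_zero
      intro x hx
      simp only [List.mem_map] at hx
      obtain ⟨li, -, rfl⟩ := hx
      rw [if_neg (by rintro ⟨-, -, hb, -, hmm⟩; exact hc ⟨hb, hmm⟩)]
    rw [hz, add_zero]
    unfold pvPend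
    have hiff : (m.testBit l = true ∧ m - 2 ^ l < M) ↔ (m.testBit l = true ∧ m - 2 ^ l < M + 1) := by
      constructor
      · rintro ⟨h1, h2⟩; exact ⟨h1, by omega⟩
      · rintro ⟨h1, h2⟩
        refine ⟨h1, ?_⟩
        rcases Nat.lt_or_ge (m - 2 ^ l) M with h3 | h3
        · exact h3
        · exfalso
          have hM : m - 2 ^ l = M := by omega
          obtain ⟨hb0, hadd⟩ := pv_testBit_sub_pow h1
          rw [hM] at hb0 hadd
          exact hc ⟨hb0, by rw [← hadd, pv_lor_eq_add hb0]⟩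
    exact if_congr hiff rfl rfl

theorem pv_init (T : List (Int × Int × Int)) (verts : List Int) (n si : Nat) (hsi : si < n) :
    pvINV T verts n si 1 (PySem.Dict.empty.insert (2 ^ si, si) 1) := by
  intro m l hm hl
  rw [PySem.Dict.getD_insert]
  unfold pvPend
  by_cases hk : ((m, l) : Nat × Nat) = (2 ^ si, si)
  · obtain ⟨hm1, hl1⟩ := Prod.mk.injEq _ _ _ _ ▸ hk
    subst hl1
    rw [if_pos hk]
    have hbit : m.testBit l = true := by rw [hm1]; exact Nat.testBit_two_pow_self
    have hge := Nat.ge_two_pow_of_testBit hbit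
    have hsub : m - 2 ^ l = 0 := by rw [hm1]; omega
    have hlt : m - 2 ^ l < 1 := by omega
    rw [if_pos ⟨hbit, hlt⟩]
    rw [pvFwd]
    simp [hm1]
  · rw [if_neg hk]
    by_cases hcond : m.testBit l = true ∧ m - 2 ^ l < 1
    · rw [if_pos hcond]
      have hge := Nat.ge_two_pow_of_testBit hcond.1
      have hml : m = 2 ^ l := by omega
      rw [pvFwd]
      rw [dif_pos hcond.1]
      have hnb : ¬ (m = 2 ^ si ∧ l = si) := by
        rintro ⟨h1, h2⟩; exact hk (by rw [h1, h2])
      rw [if_neg hnb]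
      symm
      apply List.sum_eq_zero
      intro x hx
      simp only [List.mem_map] at hx
      obtain ⟨j, -, rfl⟩ := hx
      rw [if_neg]
      rintro ⟨hb, -⟩
      rw [hml, Nat.sub_self] at hb
      simp at hb
    · rw [if_neg hcond]
      exact PySem.Dict.getD_empty _ _

theorem pv_chain (T : List (Int × Int × Int)) (verts : List Int) (n si : Nat) :
    ∀ (k M : Nat) (dp : PySem.Dict (Nat × Nat) Int), 1 ≤ M → M + k ≤ 2 ^ n →
    pvINV T verts n si M dp →
    pvINV T verts n si (M + k)
      ((List.range' M k).foldl (fun dp M' => (List.range n).foldl (aLiF T verts n M') dp) dp) := by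
  intro k
  induction k with
  | zero => intro M dp h1 h2 h; simpa using h
  | succ k ih =>
    intro M dp h1 h2 h
    rw [List.range'_succ, List.foldl_cons]
    have := ih (M + 1) ((List.range n).foldl (aLiF T verts n M) dp) (by omega) (by omega)
      (pv_step T verts n si M h1 (by omega) dp h)
    have harith : M + 1 + k = M + (k + 1) := by omega
    rwa [harith] at this

theorem pv_dp_final (T : List (Int × Int × Int)) (verts : List Int) (n si : Nat)
    (hsi : si < n) (m l : Nat) (hm : m < 2 ^ n) (hl : l < n) :
    (aDP T verts n si).getD (m, l) 0 = pvFwd T verts n si m l := by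
  have hpow : 0 < 2 ^ n := Nat.two_pow_pos n
  have hinv := pv_chain T verts n si (2 ^ n - 1) 1 (PySem.Dict.empty.insert (2 ^ si, si) 1)
    (by omega) (by omega) (pv_init T verts n si hsi)
  have h1 : 1 + (2 ^ n - 1) = 2 ^ n := by omega
  rw [h1] at hinv
  have := hinv m l hm hl
  unfold aDP
  rw [this]
  unfold pvPend
  by_cases hb : m.testBit l = true
  · have hge := Nat.ge_two_pow_of_testBit hb
    have hp2 : 0 < 2 ^ l := Nat.two_pow_pos l
    have hlt : m - 2 ^ l < 2 ^ n := by omega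
    rw [if_pos ⟨hb, hlt⟩]
  · rw [if_neg (by rintro ⟨h1', -⟩; exact hb h1')]
    rw [pvFwd, dif_neg (by simpa using hb)]

-- ---- duality: sum of forward counts at the full mask = DFS count from the source ----
def pvLvl (n k : Nat) : Finset (Nat × Nat) :=
  (Finset.range (2 ^ n) ×ˢ Finset.range n).filter (fun p => pbc n p.1 = k ∧ p.1.testBit p.2)

def pvS (T : List (Int × Int × Int)) (verts : List Int) (n si k : Nat) : Int :=
  ∑ p ∈ pvLvl n k, pvFwd T verts n si p.1 p.2 * dfsB T verts n (n - k) p.2 p.1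

theorem pv_dfsB_succ (T : List (Int × Int × Int)) (verts : List Int) (n r cur mask : Nat) :
    dfsB T verts n (r + 1) cur mask
    = ∑ i ∈ Finset.range n,
        if mask.testBit i = false ∧ tget T (vget verts cur) (vget verts i) ≠ 0
        then dfsB T verts n r i (mask ||| 2 ^ i) else 0 := by
  rw [dfsB]
  have hbody : (fun (total : Int) (ni : Nat) =>
      if mask.testBit ni then total
      else if tget T (vget verts cur) (vget verts ni) = 0 then total
      else total + dfsB T verts n r ni (mask ||| 2 ^ ni))
      = (fun (total : Int) (ni : Nat) => total +
          if mask.testBit ni = false ∧ tget T (vget verts cur) (vget verts ni) ≠ 0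
          then dfsB T verts n r ni (mask ||| 2 ^ ni) else 0) := by
    funext total ni
    by_cases h1 : mask.testBit ni
    · rw [if_pos h1, if_neg (by rintro ⟨h, -⟩; rw [h1] at h; cases h), add_zero]
    · rw [if_neg h1]
      by_cases h2 : tget T (vget verts cur) (vget verts ni) = 0
      · rw [if_pos h2, if_neg (by rintro ⟨-, h⟩; exact h h2), add_zero]
      · rw [if_neg h2, if_pos ⟨by simpa using h1, h2⟩]
  rw [hbody, PySem.List.foldl_add, zero_add]
  rfl

theorem pv_S_step (T : List (Int × Int × Int)) (verts : List Int) (n si k : Nat)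
    (hk1 : 1 ≤ k) (hk2 : k < n) :
    pvS T verts n si k = pvS T verts n si (k + 1) := by
  unfold pvS
  have hfuel : n - k = (n - (k + 1)) + 1 := by omega
  -- left side: expand the DFS one step and regroup into a sum over pairs-with-next
  have lhs_eq : ∑ p ∈ pvLvl n k, pvFwd T verts n si p.1 p.2 * dfsB T verts n (n - k) p.2 p.1
      = ∑ x ∈ (pvLvl n k ×ˢ Finset.range n).filter (fun x =>
            x.1.1.testBit x.2 = false ∧ tget T (vget verts x.1.2) (vget verts x.2) ≠ 0),
          pvFwd T verts n si x.1.1 x.1.2 *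
            dfsB T verts n (n - (k + 1)) x.2 (x.1.1 ||| 2 ^ x.2) := by
    rw [Finset.sum_filter, Finset.sum_product]
    apply Finset.sum_congr rfl
    intro p _
    rw [hfuel, pv_dfsB_succ T verts n (n - (k + 1)) p.2 p.1, Finset.mul_sum]
    apply Finset.sum_congr rfl
    intro i _
    simp only [mul_ite, mul_zero]
  -- right side: expand the forward count one step and regroup
  have rhs_eq : ∑ q ∈ pvLvl n (k + 1), pvFwd T verts n si q.1 q.2 * dfsB T verts n (n - (k + 1)) q.2 q.1
      = ∑ y ∈ (pvLvl n (k + 1) ×ˢ Finset.range n).filter (fun y =>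
            (y.1.1 - 2 ^ y.1.2).testBit y.2 = true ∧ tget T (vget verts y.2) (vget verts y.1.2) ≠ 0),
          pvFwd T verts n si (y.1.1 - 2 ^ y.1.2) y.2 *
            dfsB T verts n (n - (k + 1)) y.1.2 y.1.1 := by
    rw [Finset.sum_filter, Finset.sum_product]
    apply Finset.sum_congr rfl
    intro q hq
    unfold pvLvl at hq
    simp only [Finset.mem_filter, Finset.mem_product, Finset.mem_range] at hq
    obtain ⟨⟨hm, hl⟩, hpbc, hbit⟩ := hq
    have hnb : ¬ (q.1 = 2 ^ si ∧ q.2 = si) := by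
      rintro ⟨h1, h2⟩
      have hsin : si < n := by rw [← h2]; exact hl
      rw [h1] at hpbc
      rw [pbc_pow hsin] at hpbc
      omega
    rw [pv_fwd_eq_sum T verts n si q.1 q.2 hbit hnb]
    have hlist : ((List.range n).map (fun j =>
        if (q.1 - 2 ^ q.2).testBit j ∧ tget T (vget verts j) (vget verts q.2) ≠ 0
        then pvFwd T verts n si (q.1 - 2 ^ q.2) j else 0)).sum
        = ∑ j ∈ Finset.range n,
            if (q.1 - 2 ^ q.2).testBit j = true ∧ tget T (vget verts j) (vget verts q.2) ≠ 0
            then pvFwd T verts n si (q.1 - 2 ^ q.2) j else 0 := rfl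
    rw [hlist, Finset.sum_mul]
    apply Finset.sum_congr rfl
    intro j _
    simp only [ite_mul, zero_mul]
  rw [lhs_eq, rhs_eq]
  apply Finset.sum_nbij' (fun x => ((x.1.1 ||| 2 ^ x.2, x.2), x.1.2))
    (fun y => ((y.1.1 - 2 ^ y.1.2, y.2), y.1.2))
  · intro a ha
    simp only [Finset.mem_filter, Finset.mem_product, Finset.mem_range, pvLvl] at ha ⊢
    obtain ⟨⟨⟨⟨hm, hl⟩, hpbc, hbit⟩, hi⟩, hnb, htg⟩ := ha
    have hadd : a.1.1 ||| 2 ^ a.2 = a.1.1 + 2 ^ a.2 := pv_lor_eq_add hnb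
    have hsub : (a.1.1 ||| 2 ^ a.2) - 2 ^ a.2 = a.1.1 := by
      rw [hadd]; omega
    refine ⟨⟨⟨⟨pv_lor_lt hm hi, hi⟩, ?_, ?_⟩, hl⟩, ?_, htg⟩
    · rw [hadd, pbc_add_pow hi hnb, hpbc]
    · rw [Nat.testBit_or, Nat.testBit_two_pow_self, Bool.or_true]
    · rw [hsub]; exact hbit
  · intro a ha
    simp only [Finset.mem_filter, Finset.mem_product, Finset.mem_range, pvLvl] at ha ⊢
    obtain ⟨⟨⟨⟨hm, hi⟩, hpbc, hbit⟩, hj⟩, hsb, htg⟩ := ha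
    obtain ⟨hb0, hadd⟩ := pv_testBit_sub_pow hbit
    have hpbc2 : pbc n (a.1.1 - 2 ^ a.1.2) = k := by
      have := pbc_add_pow hi hb0
      rw [hadd] at this
      omega
    have hp2 : 0 < 2 ^ a.1.2 := Nat.two_pow_pos a.1.2
    refine ⟨⟨⟨⟨?_, hj⟩, hpbc2, hsb⟩, hi⟩, hb0, htg⟩
    omega
  · intro a ha
    simp only [Finset.mem_filter, Finset.mem_product, Finset.mem_range, pvLvl] at ha
    obtain ⟨⟨-, -⟩, hnb, -⟩ := ha
    have hadd : a.1.1 ||| 2 ^ a.2 = a.1.1 + 2 ^ a.2 := pv_lor_eq_add hnb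
    have hsub : (a.1.1 ||| 2 ^ a.2) - 2 ^ a.2 = a.1.1 := by rw [hadd]; omega
    simp [hsub]
  · intro a ha
    simp only [Finset.mem_filter, Finset.mem_product, Finset.mem_range, pvLvl] at ha
    obtain ⟨⟨⟨⟨-, -⟩, -, hbit⟩, -⟩, -, -⟩ := ha
    obtain ⟨hb0, hadd⟩ := pv_testBit_sub_pow hbit
    have : (a.1.1 - 2 ^ a.1.2) ||| 2 ^ a.1.2 = a.1.1 := by
      rw [pv_lor_eq_add hb0, hadd]
    simp [this]
  · intro a ha
    simp only [Finset.mem_filter, Finset.mem_product, Finset.mem_range, pvLvl] at ha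
    obtain ⟨⟨-, -⟩, hnb, -⟩ := ha
    have hadd : a.1.1 ||| 2 ^ a.2 = a.1.1 + 2 ^ a.2 := pv_lor_eq_add hnb
    have hsub : (a.1.1 ||| 2 ^ a.2) - 2 ^ a.2 = a.1.1 := by rw [hadd]; omega
    rw [hsub]

theorem pv_S_one (T : List (Int × Int × Int)) (verts : List Int) (n si : Nat) (hsi : si < n) :
    pvS T verts n si 1 = dfsB T verts n (n - 1) si (2 ^ si) := by
  unfold pvS
  have hmem : ((2 ^ si, si) : Nat × Nat) ∈ pvLvl n 1 := by
    unfold pvLvl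
    simp only [Finset.mem_filter, Finset.mem_product, Finset.mem_range]
    exact ⟨⟨Nat.pow_lt_pow_right (by norm_num) hsi, hsi⟩, pbc_pow hsi, Nat.testBit_two_pow_self⟩
  rw [Finset.sum_eq_single_of_mem ((2 ^ si, si) : Nat × Nat) hmem]
  · have hfwd : pvFwd T verts n si (2 ^ si) si = 1 := by
      rw [pvFwd, dif_pos Nat.testBit_two_pow_self, if_pos ⟨rfl, rfl⟩]
    rw [hfwd, one_mul]
  · intro p hp hne
    unfold pvLvl at hp
    simp only [Finset.mem_filter, Finset.mem_product, Finset.mem_range] at hp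
    obtain ⟨⟨hm, hl⟩, hpbc, hbit⟩ := hp
    have hpow : p.1 = 2 ^ p.2 := pbc_one hm hpbc hbit
    have hz : pvFwd T verts n si p.1 p.2 = 0 := by
      rw [pvFwd, dif_pos hbit]
      rw [if_neg (by rintro ⟨h1, h2⟩; exact hne (by rw [← h1, ← h2]))]
      apply List.sum_eq_zero
      intro x hx
      simp only [List.mem_map] at hx
      obtain ⟨j, -, rfl⟩ := hx
      rw [if_neg]
      rintro ⟨hb, -⟩
      rw [hpow, Nat.sub_self] at hb
      simp at hb
    rw [hz, zero_mul]

theorem pv_S_n (T : List (Int × Int × Int)) (verts : List Int) (n si : Nat) :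
    pvS T verts n si n = ∑ l ∈ Finset.range n, pvFwd T verts n si (2 ^ n - 1) l := by
  unfold pvS
  have hset : pvLvl n n = ({2 ^ n - 1} : Finset Nat) ×ˢ Finset.range n := by
    apply Finset.ext
    intro p
    unfold pvLvl
    simp only [Finset.mem_filter, Finset.mem_product, Finset.mem_range, Finset.mem_singleton]
    constructor
    · rintro ⟨⟨hm, hl⟩, hpbc, -⟩
      exact ⟨pbc_full hm hpbc, hl⟩
    · rintro ⟨h1, h2⟩
      have hpow : 0 < 2 ^ n := Nat.two_pow_pos n
      refine ⟨⟨by omega, h2⟩, ?_, ?_⟩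
      · unfold pbc
        have : (Finset.range n).filter (fun i => (2 ^ n - 1).testBit i) = Finset.range n := by
          apply Finset.filter_true_of_mem
          intro i hi
          rw [Nat.testBit_two_pow_sub_one]
          simpa using Finset.mem_range.mp hi
        rw [h1, this, Finset.card_range]
      · rw [h1, Nat.testBit_two_pow_sub_one]
        simpa using h2
  rw [hset, Finset.sum_product, Finset.sum_singleton]
  apply Finset.sum_congr rfl
  intro l hl
  have : n - n = 0 := by omega
  rw [this]
  show pvFwd T verts n si (2 ^ n - 1) l * 1 = _
  rw [mul_one]

theorem pv_S_chain (T : List (Int × Int × Int)) (verts : List Int) (n si : Nat) :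
    ∀ (j k : Nat), 1 ≤ k → k + j ≤ n → pvS T verts n si k = pvS T verts n si (k + j) := by
  intro j
  induction j with
  | zero => intro k _ _; rfl
  | succ j ih =>
    intro k h1 h2
    rw [pv_S_step T verts n si k h1 (by omega), ih (k + 1) (by omega) (by omega)]
    have : k + 1 + j = k + (j + 1) := by omega
    rw [this]

-- ---- vIdx facts ----
theorem pv_fold_none_mono : ∀ (l : List (Int × Nat)) (d : PySem.Dict Int Nat) (x : Int),
    (l.foldl (fun d p => d.insert p.1 p.2) d).get? x = none → d.get? x = none := by
  intro l
  induction l with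
  | nil => intro d x h; exact h
  | cons q rest ih =>
    intro d x h
    rw [List.foldl_cons] at h
    have h2 := ih _ x h
    rw [PySem.Dict.get?_insert] at h2
    by_cases he : x = q.1
    · rw [if_pos he] at h2; cases h2
    · rw [if_neg he] at h2; exact h2

theorem pv_vIdx_some (verts : List Int) (source : Int) (si : Nat)
    (h : (vIdx verts).get? source = some si) :
    si < verts.length ∧ vget verts si = source := by
  unfold vIdx at h
  have key : ∀ (l : List (Int × Nat)) (d : PySem.Dict Int Nat),
      (l.foldl (fun d p => d.insert p.1 p.2) d).get? source = some si →
      (∃ p ∈ l, p.1 = source ∧ p.2 = si) ∨ d.get? source = some si := by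
    intro l
    induction l with
    | nil => intro d h'; exact Or.inr h'
    | cons p rest ih =>
      intro d h'
      rw [List.foldl_cons] at h'
      rcases ih _ h' with h'' | h''
      · obtain ⟨q, hq, hq2⟩ := h''
        exact Or.inl ⟨q, List.mem_cons_of_mem _ hq, hq2⟩
      · rw [PySem.Dict.get?_insert] at h''
        by_cases he : source = p.1
        · rw [if_pos he] at h''
          exact Or.inl ⟨p, List.mem_cons_self, he.symm, by injection h''⟩
        · rw [if_neg he] at h''
          exact Or.inr h''
  rcases key _ _ h with h' | h'
  · obtain ⟨p, hp, hp1, hp2⟩ := h'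
    have hz := List.mem_zipIdx (x := p.1) (i := p.2) (k := 0) (by simpa using hp)
    obtain ⟨-, hlt, hv⟩ := hz
    refine ⟨by omega, ?_⟩
    rw [← hp2, ← hp1, hv]
    unfold vget
    rw [List.getD_eq_getElem verts 0 (by omega)]
    simp
  · rw [PySem.Dict.get?_empty] at h'
    cases h'

theorem pv_vIdx_none (verts : List Int) (source : Int)
    (h : (vIdx verts).get? source = none) : ∀ v ∈ verts, v ≠ source := by
  unfold vIdx at h
  have key : ∀ (l : List (Int × Nat)) (d : PySem.Dict Int Nat),
      (l.foldl (fun d p => d.insert p.1 p.2) d).get? source = none →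
      (∀ p ∈ l, p.1 ≠ source) := by
    intro l
    induction l with
    | nil => intro d _ p hp; cases hp
    | cons q rest ih =>
      intro d h' p hp
      rw [List.foldl_cons] at h'
      rcases List.mem_cons.mp hp with rfl | hp'
      · intro he
        have h2 := pv_fold_none_mono rest _ source h'
        rw [PySem.Dict.get?_insert, if_pos he.symm] at h2
        cases h2
      · exact ih _ h' p hp'
  intro v hv
  obtain ⟨i, hi, rfl⟩ := List.mem_iff_getElem.mp hv
  intro he
  have hmem : ((verts[i], i) : Int × Nat) ∈ verts.zipIdx := by
    rw [List.mem_zipIdx_iff_getElem?]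
    simp [List.getElem?_eq_getElem hi]
  exact key _ _ h (verts[i], i) hmem he

-- ---- main ----
theorem pv_main (T : List (Int × Int × Int)) (verts : List Int) (n si : Nat)
    (hn : n = verts.length) (hsi : si < n) :
    (List.range n).foldl (fun total li => total + (aDP T verts n si).getD (2 ^ n - 1, li) 0) 0
    = dfsB T verts n (n - 1) si (2 ^ si) := by
  rw [PySem.List.foldl_add, zero_add]
  have hpow : 0 < 2 ^ n := Nat.two_pow_pos n
  have hfin : ((List.range n).map (fun li => (aDP T verts n si).getD (2 ^ n - 1, li) 0)).sum
      = ∑ li ∈ Finset.range n, (aDP T verts n si).getD (2 ^ n - 1, li) 0 := rfl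
  rw [hfin]
  have hsum : ∑ li ∈ Finset.range n, (aDP T verts n si).getD (2 ^ n - 1, li) 0
      = ∑ li ∈ Finset.range n, pvFwd T verts n si (2 ^ n - 1) li := by
    apply Finset.sum_congr rfl
    intro li hli
    exact pv_dp_final T verts n si hsi (2 ^ n - 1) li (by omega) (Finset.mem_range.mp hli)
  rw [hsum, ← pv_S_n T verts n si]
  have hchain := pv_S_chain T verts n si (n - 1) 1 (by omega) (by omega)
  have h1n : 1 + (n - 1) = n := by omega
  rw [h1n] at hchain
  rw [← hchain]
  exact pv_S_one T verts n si hsi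


-- ===== VERDICT (by name: the statement is the Claim_ definition above) =====
theorem count_paths_starting_at_spec : Claim_equal_count_paths_starting_at := by
  intro T verts source _
  unfold Spec_count_paths_starting_at
  simp only [count_paths_starting_at, count_paths_starting_at_alt]
  cases hg : (vIdx verts).get? source with
  | none =>
    by_cases h1 : verts.length = 1
    · rw [if_pos h1]
      have hnone := pv_vIdx_none verts source hg
      have hmem : verts.getD 0 0 ∈ verts := by
        cases verts with
        | nil => simp at h1
        | cons a l => simp
      have hne : vget verts 0 ≠ source := hnone _ hmem
      rw [if_neg hne]
    · rw [if_neg h1]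
  | some si =>
    obtain ⟨hsi, hvs⟩ := pv_vIdx_some verts source si hg
    by_cases h1 : verts.length = 1
    · rw [if_pos h1]
      have hsi0 : si = 0 := by omega
      rw [if_pos (by rw [← hvs, hsi0]), h1]
      rfl
    · rw [if_neg h1]
      exact pv_main T verts verts.length si rfl hsi
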